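-- pv_equiv track=rewrite | github.com/PagesTr/My-first-game | tools/analyze_craftability.py | get_recipe_status
-- ===== SOURCE A (Python) =====
-- def get_recipe_status(recipe, available_items):
--     missing_items = []
--     for ingredient in recipe.get("ingredients", []):
--         item_id = ingredient.get("item")
--         if item_id and item_id not in available_items:
--             missing_items.append(item_id)
--
--     if missing_items:
--         return "BLOCKED", sorted(set(missing_items))
--     return "OK", []
-- ===== SOURCE B (Python) =====
-- def get_recipe_status(recipe, available_items):
--     required = sorted({ing.get("item") for ing in recipe.get("ingredients", []) if ing.get("item")})
--     avail = sorted(set(available_items))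
--     missing = []
--     while required:
--         if avail and avail[0] < required[0]:
--             avail = avail[1:]
--         elif avail and avail[0] == required[0]:
--             required = required[1:]
--         else:
--             missing.append(required[0])
--             required = required[1:]
--     if missing:
--         return "BLOCKED", missing
--     return "OK", []
-- ===== Notes on version B (the rewrite author's own statement) =====
-- stated objective: alternative
-- what changed: B sorts the deduplicated required ids and the deduplicated available ids up front and computes the missing items by a two-pointer merge of the two sorted lists (producing the sorted result directly), instead of A's per-ingredient membership scan into a list that is then deduplicated and sorted at the end.
import Mathlib
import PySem

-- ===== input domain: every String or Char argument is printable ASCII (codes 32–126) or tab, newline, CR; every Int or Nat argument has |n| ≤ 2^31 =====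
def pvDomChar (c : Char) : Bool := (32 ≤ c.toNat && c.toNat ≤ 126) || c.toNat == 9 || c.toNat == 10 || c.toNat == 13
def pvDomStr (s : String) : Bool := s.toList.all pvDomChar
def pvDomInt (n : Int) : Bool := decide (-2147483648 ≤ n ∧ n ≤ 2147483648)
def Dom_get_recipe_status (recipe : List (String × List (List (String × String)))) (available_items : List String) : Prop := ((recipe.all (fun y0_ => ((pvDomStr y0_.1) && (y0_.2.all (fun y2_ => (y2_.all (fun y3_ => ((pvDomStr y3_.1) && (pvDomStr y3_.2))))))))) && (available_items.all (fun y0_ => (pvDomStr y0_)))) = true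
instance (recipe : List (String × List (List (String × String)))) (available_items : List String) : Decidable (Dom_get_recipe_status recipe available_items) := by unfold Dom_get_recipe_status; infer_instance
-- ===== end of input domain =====

-- B sorts the deduplicated required and available id lists up front and finds the missing ids by a
-- two-pointer merge of the two sorted lists (no membership tests), instead of A's per-ingredient
-- membership scan followed by a final dedup-and-sort. Alternative algorithm, same result.

-- ===== PORT A =====
def get_recipe_status (recipe : List (String × List (List (String × String)))) (available_items : List String) : String × List String :=
  let missing_items : List String :=
    ((PySem.Dict.mk recipe).getD "ingredients" []).foldl (fun acc ingredient =>
      match (PySem.Dict.mk ingredient).get? "item" with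
      | some item_id => if item_id ≠ "" ∧ item_id ∉ available_items then acc ++ [item_id] else acc
      | none => acc) []
  if missing_items ≠ [] then
    ("BLOCKED", PySem.List.sorted (PySem.Set.ofList missing_items) (fun x => x) false)
  else ("OK", [])

-- ===== PORT B =====
-- B's while loop over the two shrinking sorted lists, as structural recursion on the same pair.
def mergeMissing : List String → List String → List String
  | [], _ => []
  | r :: rs, a :: as =>
      if a < r then mergeMissing (r :: rs) as
      else if a = r then mergeMissing rs (a :: as)
      else r :: mergeMissing rs (a :: as)
  | r :: rs, [] => r :: mergeMissing rs []
termination_by req avail => req.length + avail.length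

def get_recipe_status_alt (recipe : List (String × List (List (String × String)))) (available_items : List String) : String × List String :=
  let required : List String :=
    PySem.List.sorted (PySem.Set.ofList
      (((PySem.Dict.mk recipe).getD "ingredients" []).filterMap (fun ing =>
        match (PySem.Dict.mk ing).get? "item" with
        | some i => if i ≠ "" then some i else none
        | none => none))) (fun x => x) false
  let avail : List String :=
    PySem.List.sorted (PySem.Set.ofList available_items) (fun x => x) false
  let missing := mergeMissing required avail
  if missing ≠ [] then ("BLOCKED", missing) else ("OK", [])

-- ===== PRECONDITION & SPEC =====
def Spec_get_recipe_status (recipe : List (String × List (List (String × String)))) (available_items : List String) (out : String × List String) : Prop := out = get_recipe_status_alt recipe available_items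
instance (recipe : List (String × List (List (String × String)))) (available_items : List String) (out : String × List String) : Decidable (Spec_get_recipe_status recipe available_items out) := by unfold Spec_get_recipe_status; infer_instance

-- ===== CLAIM (what is proved, stated in full; the proofs are below) =====
def Claim_equal_get_recipe_status : Prop := ∀ (recipe : List (String × List (List (String × String)))) (available_items : List String), Dom_get_recipe_status recipe available_items → Spec_get_recipe_status recipe available_items (get_recipe_status recipe available_items)

-- ===== LEMMAS AND PROOFS =====

-- A's appending loop, for an arbitrary filter condition, is a filterMap.
theorem A_loop (c : String → Prop) [DecidablePred c] (xs : List (List (String × String))) (acc : List String) :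
    xs.foldl (fun acc ing => match (PySem.Dict.mk ing).get? "item" with
      | some i => if c i then acc ++ [i] else acc
      | none => acc) acc
      = acc ++ xs.filterMap (fun ing => match (PySem.Dict.mk ing).get? "item" with
          | some i => if c i then some i else none
          | none => none) := by
  induction xs generalizing acc with
  | nil => simp
  | cons x xs ih =>
    cases h : (PySem.Dict.mk x).get? "item" with
    | none => simp [List.foldl, h, ih]
    | some i => by_cases hc : c i <;> simp [List.foldl, h, hc, ih]

-- splitting a conjunctive condition of the filterMap into filterMap-then-filter
theorem filterMap_and_split (P Q : String → Prop) [DecidablePred P] [DecidablePred Q]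
    (xs : List (List (String × String))) :
    xs.filterMap (fun ing => match (PySem.Dict.mk ing).get? "item" with
      | some i => if P i ∧ Q i then some i else none
      | none => none)
      = (xs.filterMap (fun ing => match (PySem.Dict.mk ing).get? "item" with
          | some i => if P i then some i else none
          | none => none)).filter (fun i => decide (Q i)) := by
  induction xs with
  | nil => simp
  | cons x xs ih =>
    cases h : (PySem.Dict.mk x).get? "item" with
    | none => simp [h, ih]
    | some i =>
      by_cases hp : P i <;> by_cases hq : Q i <;>
        simp [h, hp, hq, ih]

-- the two-pointer merge on weakly sorted lists is the filter by non-membership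
theorem mergeMissing_eq_filter : ∀ (req avail : List String),
    req.Pairwise (· ≤ ·) → avail.Pairwise (· ≤ ·) →
    mergeMissing req avail = req.filter (fun r => decide (r ∉ avail))
  | [], _, _, _ => by simp [mergeMissing]
  | r :: rs, [], hreq, _ => by
    have := mergeMissing_eq_filter rs [] (List.Pairwise.sublist (List.sublist_cons_self r rs) hreq) List.Pairwise.nil
    simp [mergeMissing, this]
  | r :: rs, a :: as, hreq, hav => by
    rcases List.pairwise_cons.mp hav with ⟨ha, has⟩
    rcases List.pairwise_cons.mp hreq with ⟨hr, hrs⟩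
    by_cases h1 : a < r
    · -- a is smaller than every required id, so dropping it does not change the filter
      have hnot : ∀ x ∈ r :: rs, x ≠ a := by
        intro x hx e
        subst e
        rcases List.mem_cons.mp hx with rfl | hx
        · exact absurd h1 (lt_irrefl _)
        · exact absurd (lt_of_lt_of_le h1 (hr _ hx)) (lt_irrefl _)
      have := mergeMissing_eq_filter (r :: rs) as hreq has
      rw [mergeMissing, if_pos h1, this]
      apply List.filter_congr
      intro x hx
      simp only [List.mem_cons, decide_eq_decide]
      have := hnot x hx
      tauto
    · by_cases h2 : a = r
      · subst h2
        have := mergeMissing_eq_filter rs (a :: as) hrs hav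
        rw [mergeMissing, if_neg h1, if_pos rfl, this]
        simp
      · -- r < a ≤ every available id, so r is missing
        have hra : r < a := lt_of_le_of_ne (le_of_not_gt h1) (fun e => h2 e.symm)
        have hrnot : r ∉ a :: as := by
          intro hm
          rcases List.mem_cons.mp hm with e | hm
          · rw [e] at hra; exact lt_irrefl _ hra
          · exact absurd (lt_of_lt_of_le hra (ha r hm)) (lt_irrefl r)
        have := mergeMissing_eq_filter rs (a :: as) hrs hav
        rw [mergeMissing, if_neg h1, if_neg h2, this]
        rw [List.filter_cons, if_pos (by simpa using hrnot)]
termination_by req avail => req.length + avail.length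

-- ===== VERDICT (by name: the statement is the Claim_ definition above) =====
theorem get_recipe_status_spec : Claim_equal_get_recipe_status := by
  unfold Claim_equal_get_recipe_status
  intro recipe available_items _
  unfold Spec_get_recipe_status get_recipe_status get_recipe_status_alt
  set items := (PySem.Dict.mk recipe).getD "ingredients" [] with hitems
  have hA := A_loop (fun i => i ≠ "" ∧ i ∉ available_items) items []
  simp only [List.nil_append] at hA
  rw [hA, filterMap_and_split (fun i => i ≠ "") (fun i => i ∉ available_items)]
  set RQ := items.filterMap (fun ing => match (PySem.Dict.mk ing).get? "item" with
      | some i => if i ≠ "" then some i else none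
      | none => none) with hRQ
  set p : String → Bool := fun i => decide (i ∉ available_items) with hp
  -- B's merge is a filter of the sorted required list
  have hreqlt := PySem.List.sorted_ofList_pairwise_lt (xs := RQ)
  have havlt := PySem.List.sorted_ofList_pairwise_lt (xs := available_items)
  have hmerge := mergeMissing_eq_filter
      (PySem.List.sorted (PySem.Set.ofList RQ) (fun x => x) false)
      (PySem.List.sorted (PySem.Set.ofList available_items) (fun x => x) false)
      (hreqlt.imp le_of_lt) (havlt.imp le_of_lt)
  -- membership in sorted(set(available_items)) is membership in available_items
  have hmem_av : ∀ x : String,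
      x ∈ PySem.List.sorted (PySem.Set.ofList available_items) (fun x => x) false ↔ x ∈ available_items := by
    intro x
    rw [PySem.List.mem_sorted, PySem.Set.mem_ofList]
  have hmerge' : mergeMissing (PySem.List.sorted (PySem.Set.ofList RQ) (fun x => x) false)
      (PySem.List.sorted (PySem.Set.ofList available_items) (fun x => x) false)
      = (PySem.List.sorted (PySem.Set.ofList RQ) (fun x => x) false).filter p := by
    rw [hmerge]
    apply List.filter_congr
    intro x _
    simp only [hp, decide_eq_decide]
    exact not_congr (hmem_av x)
  -- A's sorted(set(filter)) equals that same filtered sorted list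
  have hkey : PySem.List.sorted (PySem.Set.ofList (RQ.filter p)) (fun x => x) false
      = (PySem.List.sorted (PySem.Set.ofList RQ) (fun x => x) false).filter p := by
    have hnd : ((PySem.List.sorted (PySem.Set.ofList RQ) (fun x => x) false).filter p).Nodup :=
      List.Nodup.filter _ ((PySem.List.sorted_perm _ _ _).nodup_iff.mpr (PySem.Set.nodup_ofList _))
    have hperm : ((PySem.List.sorted (PySem.Set.ofList RQ) (fun x => x) false).filter p).Perm
        (PySem.Set.ofList (RQ.filter p)) := by
      apply (List.perm_ext_iff_of_nodup hnd (PySem.Set.nodup_ofList _)).mpr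
      intro x
      simp [List.mem_filter, PySem.List.mem_sorted, PySem.Set.mem_ofList]
    exact PySem.List.sorted_eq_of_perm_of_pairwise_lt _ _ _ hperm (List.Pairwise.filter _ hreqlt)
  simp only [hmerge', ← hkey]
  -- finally, the two branch conditions agree
  have hnil : (RQ.filter p ≠ []) ↔
      (PySem.List.sorted (PySem.Set.ofList (RQ.filter p)) (fun x => x) false ≠ []) := by
    rw [not_iff_not, PySem.List.sorted_eq_nil_iff]
    constructor
    · intro h; rw [h]; rfl
    · intro h
      rcases List.eq_nil_or_concat (RQ.filter p) with he | ⟨ys, y, hy⟩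
      · exact he
      · exfalso
        have : y ∈ (PySem.Set.ofList (RQ.filter p) : List String) := by
          rw [PySem.Set.mem_ofList, hy]; simp
        rw [h] at this; simp at this
  by_cases hne : RQ.filter p ≠ []
  · rw [if_pos hne, if_pos (hnil.mp hne)]
  · rw [if_neg hne, if_neg (fun h => hne (hnil.mpr h))]
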